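-- pv_equiv track=rewrite | github.com/adhir-potdar/sql-lineage | src/analyzer/visualization/visualizer.py | _format_sql_for_display
-- ===== SOURCE A (Python) =====
-- def _format_sql_for_display(sql_query: str) -> str:
--     """
--     Format SQL query for display in diagram label.
--
--     Args:
--         sql_query: Raw SQL query string
--
--     Returns:
--         Formatted SQL query string suitable for display
--     """
--     if not sql_query:
--         return ""
--
--     # Clean the query
--     lines = sql_query.strip().split('\n')
--     cleaned_lines = []
--
--     for line in lines:
--         # Remove excessive whitespace but preserve indentation
--         stripped_line = line.rstrip()
--         if stripped_line:  # Skip empty lines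
--             cleaned_lines.append(stripped_line)
--
--     # Join lines for display - show full query without truncation
--     cleaned_query = '\n'.join(cleaned_lines)
--
--     # Escape special characters for Graphviz
--     cleaned_query = cleaned_query.replace('"', '\\"')
--     cleaned_query = cleaned_query.replace('{', '\\{')
--     cleaned_query = cleaned_query.replace('}', '\\}')
--     cleaned_query = cleaned_query.replace('<', '\\<')
--     cleaned_query = cleaned_query.replace('>', '\\>')
--
--     return cleaned_query
-- ===== SOURCE B (Python) =====
-- def _format_sql_for_display(sql_query: str) -> str:
--     if not sql_query:
--         return ""
--     # Clean: rstrip each line, drop the empty ones, rejoin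
--     cleaned = [line.rstrip() for line in sql_query.strip().split('\n')]
--     body = '\n'.join(line for line in cleaned if line)
--     # Escape Graphviz specials in ONE character-level pass instead of five replace scans
--     specials = {'"', '{', '}', '<', '>'}
--     return ''.join('\\' + c if c in specials else c for c in body)
-- ===== Notes on version B (the rewrite author's own statement) =====
-- stated objective: idiomatic
-- what changed: The five sequential full-string .replace scans are replaced by a single character-level pass that emits '\'+c for the five Graphviz specials via a set membership test, and the line-cleaning loop with an accumulator becomes a comprehension + filter.
import Mathlib
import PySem

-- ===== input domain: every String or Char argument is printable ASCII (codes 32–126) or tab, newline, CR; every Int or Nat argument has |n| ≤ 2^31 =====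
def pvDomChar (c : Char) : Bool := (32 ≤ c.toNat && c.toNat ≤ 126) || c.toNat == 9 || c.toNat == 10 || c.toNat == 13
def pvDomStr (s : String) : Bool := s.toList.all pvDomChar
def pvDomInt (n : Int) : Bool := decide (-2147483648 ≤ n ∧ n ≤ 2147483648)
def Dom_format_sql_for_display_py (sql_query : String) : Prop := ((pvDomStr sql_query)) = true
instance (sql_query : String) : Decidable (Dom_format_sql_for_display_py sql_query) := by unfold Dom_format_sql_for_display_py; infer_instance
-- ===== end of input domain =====

-- B is the same cleaning step written as a comprehension + filter, with the five sequential
-- .replace scans fused into ONE character-level escaping pass (objective: idiomatic, same cost).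

-- ===== PORT A =====
def format_sql_for_display_py (sql_query : String) : String :=
  if sql_query = "" then ""
  else
    let lines := PySem.Chars.splitOn (PySem.Chars.strip sql_query.toList) ['\n']
    let cleaned_lines := lines.foldl (fun acc line =>
      let stripped_line := PySem.Chars.rstrip line
      if stripped_line ≠ [] then acc ++ [stripped_line] else acc) []
    let q0 := PySem.Chars.join ['\n'] cleaned_lines
    let q1 := PySem.Chars.replace q0 ['"'] ['\\', '"']
    let q2 := PySem.Chars.replace q1 ['{'] ['\\', '{']
    let q3 := PySem.Chars.replace q2 ['}'] ['\\', '}']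
    let q4 := PySem.Chars.replace q3 ['<'] ['\\', '<']
    let q5 := PySem.Chars.replace q4 ['>'] ['\\', '>']
    String.ofList q5

-- ===== PORT B =====
def format_sql_for_display_py_alt (sql_query : String) : String :=
  if sql_query = "" then ""
  else
    let cleaned := (PySem.Chars.splitOn (PySem.Chars.strip sql_query.toList) ['\n']).map PySem.Chars.rstrip
    let body := PySem.Chars.join ['\n'] (cleaned.filter (fun line => !line.isEmpty))
    String.ofList (body.flatMap (fun c =>
      if c ∈ ['"', '{', '}', '<', '>'] then ['\\', c] else [c]))

-- ===== PRECONDITION & SPEC =====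
def Spec_format_sql_for_display_py (sql_query : String) (out : String) : Prop := out = format_sql_for_display_py_alt sql_query
instance (sql_query : String) (out : String) : Decidable (Spec_format_sql_for_display_py sql_query out) := by unfold Spec_format_sql_for_display_py; infer_instance

-- ===== CLAIM (what is proved, stated in full; the proofs are below) =====
def Claim_equal_format_sql_for_display_py : Prop := ∀ (sql_query : String), Dom_format_sql_for_display_py sql_query → Spec_format_sql_for_display_py sql_query (format_sql_for_display_py sql_query)

-- ===== LEMMAS AND PROOFS =====

-- replace with a single-character pattern is a per-character flatMap
lemma replace_go_single (a : Char) (r : List Char) :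
    ∀ (fuel : Nat) (l acc : List Char), l.length ≤ fuel →
      PySem.Chars.replace.go [a] r fuel l acc
        = acc.reverse ++ l.flatMap (fun c => if c = a then r else [c]) := by
  intro fuel
  induction fuel with
  | zero =>
    intro l acc h
    have hl : l = [] := List.eq_nil_of_length_eq_zero (Nat.le_zero.mp h)
    subst hl
    simp [PySem.Chars.replace.go]
  | succ n ih =>
    intro l acc h
    cases l with
    | nil => simp [PySem.Chars.replace.go]
    | cons c t =>
      by_cases hc : c = a
      · subst hc
        have hpre : List.isPrefixOf [c] (c :: t) = true := by
          simp [List.isPrefixOf]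
        simp only [PySem.Chars.replace.go, hpre, if_true]
        rw [show List.drop ([c] : List Char).length (c :: t) = t from rfl]
        rw [ih t (r.reverse ++ acc) (by simpa using Nat.le_of_succ_le_succ h)]
        simp
      · have hpre : List.isPrefixOf [a] (c :: t) = false := by
          simp [List.isPrefixOf]
          intro hh; exact hc hh.symm
        simp only [PySem.Chars.replace.go, hpre]
        rw [ih t (c :: acc) (by simpa using Nat.le_of_succ_le_succ h)]
        simp [hc]

lemma replace_single (cs : List Char) (a : Char) (r : List Char) :
    PySem.Chars.replace cs [a] r = cs.flatMap (fun c => if c = a then r else [c]) := by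
  have : ([a] : List Char).isEmpty = false := rfl
  simp only [PySem.Chars.replace, this, Bool.false_eq_true, if_false]
  simpa using replace_go_single a r cs.length cs [] (le_refl _)

-- the five sequential single-character replaces are one escaping pass
lemma replace_chain (body : List Char) :
    PySem.Chars.replace (PySem.Chars.replace (PySem.Chars.replace (PySem.Chars.replace
        (PySem.Chars.replace body ['"'] ['\\', '"']) ['{'] ['\\', '{']) ['}'] ['\\', '}'])
        ['<'] ['\\', '<']) ['>'] ['\\', '>']
      = body.flatMap (fun c => if c ∈ ['"', '{', '}', '<', '>'] then ['\\', c] else [c]) := by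
  simp only [replace_single]
  induction body with
  | nil => simp
  | cons c t ih =>
    simp only [List.flatMap_cons, List.flatMap_append]
    rw [ih]
    congr 1
    by_cases h1 : c = '"'; · subst h1; decide
    by_cases h2 : c = '{'; · subst h2; decide
    by_cases h3 : c = '}'; · subst h3; decide
    by_cases h4 : c = '<'; · subst h4; decide
    by_cases h5 : c = '>'; · subst h5; decide
    simp [h1, h2, h3, h4, h5]

-- A's accumulator loop over the lines is B's map-then-filter
lemma clean_lines_eq (lines : List (List Char)) :
    lines.foldl (fun acc line =>
        let stripped_line := PySem.Chars.rstrip line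
        if stripped_line ≠ [] then acc ++ [stripped_line] else acc) []
      = (lines.map PySem.Chars.rstrip).filter (fun line => !line.isEmpty) := by
  have h := PySem.List.foldl_append_if (fun line => !(PySem.Chars.rstrip line).isEmpty)
      PySem.Chars.rstrip lines []
  simp only [List.nil_append] at h
  rw [show (fun (acc : List (List Char)) line =>
        let stripped_line := PySem.Chars.rstrip line
        if stripped_line ≠ [] then acc ++ [stripped_line] else acc)
      = (fun acc line => if (!(PySem.Chars.rstrip line).isEmpty) = true
          then acc ++ [PySem.Chars.rstrip line] else acc) by
    funext acc line
    by_cases hl : PySem.Chars.rstrip line = [] <;> simp [hl]]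
  rw [h, List.filter_map]
  rfl

-- ===== VERDICT (by name: the statement is the Claim_ definition above) =====
theorem format_sql_for_display_py_spec : Claim_equal_format_sql_for_display_py := by
  intro s _
  unfold Spec_format_sql_for_display_py format_sql_for_display_py format_sql_for_display_py_alt
  by_cases hs : s = ""
  · simp [hs]
  · simp only [hs, if_false]
    rw [clean_lines_eq, replace_chain]
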